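-- pv_equiv track=rewrite | github.com/Kir93/python-algorithm | 프로그래머스/1/133499. 옹알이 （2）/옹알이 （2）.py | solution
-- ===== SOURCE A (Python) =====
-- def solution(babbling):
--     words = ['aya', 'ye', 'woo', 'ma']
--     answer = 0
--
--     for x in babbling:
--         idx = 0
--         prev = ''
--         is_valid = True
--
--         while idx < len(x):
--             matched = False
--
--             for word in words:
--                 if x.startswith(word, idx) and word != prev:
--                     prev = word
--                     idx += len(word)
--                     matched = True
--                     break
--
--             if not matched:
--                 is_valid = False
--                 break
--
--         if is_valid:
--             answer += 1
--
--     return answer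
-- ===== SOURCE B (Python) =====
-- def solution(babbling):
--     # Recursive descent: a string is valid iff it is empty, or it starts with an
--     # allowed word different from the previous one and the rest is valid.
--     # (No allowed word is a prefix of another, so the first match is the only match.)
--     def ok(s, prev):
--         if s == '':
--             return True
--         for w in ('aya', 'ye', 'woo', 'ma'):
--             if w != prev and s.startswith(w):
--                 return ok(s[len(w):], w)
--         return False
--     return sum(ok(x, '') for x in babbling)
-- ===== Notes on version B (the rewrite author's own statement) =====
-- stated objective: simpler
-- what changed: Replaced the imperative index/prev/matched/is_valid while-loop judge with a short recursive-descent predicate on the string's suffix, counted with sum() over a generator.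
import Mathlib
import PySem

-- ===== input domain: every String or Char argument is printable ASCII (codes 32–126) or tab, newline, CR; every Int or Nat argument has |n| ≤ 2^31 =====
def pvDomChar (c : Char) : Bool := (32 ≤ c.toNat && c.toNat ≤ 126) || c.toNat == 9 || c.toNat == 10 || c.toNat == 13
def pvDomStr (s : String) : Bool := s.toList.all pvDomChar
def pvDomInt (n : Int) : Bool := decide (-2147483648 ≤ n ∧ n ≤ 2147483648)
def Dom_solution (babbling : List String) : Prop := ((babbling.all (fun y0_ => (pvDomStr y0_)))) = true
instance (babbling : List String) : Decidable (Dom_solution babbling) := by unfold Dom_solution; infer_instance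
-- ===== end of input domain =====

-- B replaces A's imperative index/prev/matched-flag while-loop with a short
-- recursive-descent validity predicate on the string's suffix (simpler; same cost).

-- ===== PORT A =====

def pvWordsA : List String := ["aya", "ye", "woo", "ma"]

-- x.startswith(word, idx) with idx ≥ 0: exact — prefix test on the suffix from idx
def pvStartsAt (x : List Char) (w : String) (idx : Nat) : Bool :=
  w.toList.isPrefixOf (x.drop idx)

-- the inner `for word in words: … break`: first word matching at idx and ≠ prev
def pvAFind (x : List Char) (idx : Nat) (prev : String) : List String → Option String
  | [] => none
  | w :: ws => if pvStartsAt x w idx && w != prev then some w else pvAFind x idx prev ws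

theorem pvAFind_mem {x : List Char} {idx : Nat} {prev : String} :
    ∀ {ws : List String} {w : String}, pvAFind x idx prev ws = some w → w ∈ ws := by
  intro ws
  induction ws with
  | nil => intro w h; simp [pvAFind] at h
  | cons a as ih =>
    intro w h
    simp only [pvAFind] at h
    split at h
    · cases h; exact List.mem_cons_self
    · exact List.mem_cons_of_mem _ (ih h)

-- the `while idx < len(x)` loop; returns is_valid
def pvAGo (x : List Char) (idx : Nat) (prev : String) : Bool :=
  if _h : idx < x.length then
    match hf : pvAFind x idx prev pvWordsA with
    | some w => pvAGo x (idx + w.toList.length) w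
    | none => false
  else true
termination_by x.length - idx
decreasing_by
  have hm : w ∈ pvWordsA := pvAFind_mem hf
  have hw : 0 < w.toList.length := by
    fin_cases hm <;> decide
  omega

def solution (babbling : List String) : Int :=
  babbling.foldl (fun answer x => if pvAGo x.toList 0 "" then answer + 1 else answer) 0

-- ===== PORT B =====

-- recursive descent: empty is valid; else consume the (unique) matching word ≠ prev
def pvOk (s : List Char) (prev : String) : Bool :=
  if s.isEmpty then true
  else
    match hf : (["aya", "ye", "woo", "ma"] : List String).find?
        (fun w => w != prev && w.toList.isPrefixOf s) with
    | some w => pvOk (s.drop w.toList.length) w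
    | none => false
termination_by s.length
decreasing_by
  have hm : w ∈ (["aya", "ye", "woo", "ma"] : List String) := List.mem_of_find?_eq_some hf
  have hw : 0 < w.toList.length := by fin_cases hm <;> decide
  have hs : s ≠ [] := by
    simp_all [List.isEmpty_iff]
  have : 0 < s.length := List.length_pos_iff.mpr hs
  simp only [List.length_drop]
  omega

def solution_alt (babbling : List String) : Int :=
  (babbling.map (fun x => if pvOk x.toList "" then (1 : Int) else 0)).sum

-- ===== PRECONDITION & SPEC =====
def Spec_solution (babbling : List String) (out : Int) : Prop := out = solution_alt babbling
instance (babbling : List String) (out : Int) : Decidable (Spec_solution babbling out) := by unfold Spec_solution; infer_instance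

-- ===== CLAIM (what is proved, stated in full; the proofs are below) =====
def Claim_equal_solution : Prop := ∀ (babbling : List String), Dom_solution babbling → Spec_solution babbling (solution babbling)

-- ===== LEMMAS AND PROOFS =====

-- A's first-match scan over the word list is B's find? (conjuncts commuted)
theorem pvAFind_eq_find? (x : List Char) (idx : Nat) (prev : String) :
    ∀ ws : List String,
      pvAFind x idx prev ws = ws.find? (fun w => w != prev && w.toList.isPrefixOf (x.drop idx))
  | [] => rfl
  | w :: ws => by
    simp only [pvAFind, List.find?, pvStartsAt, Bool.and_comm, pvAFind_eq_find? x idx prev ws]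
    cases h : (w != prev && w.toList.isPrefixOf (x.drop idx)) <;> simp [h]

theorem go_eq_ok : ∀ (n : Nat) (x : List Char) (idx : Nat) (prev : String),
    x.length - idx ≤ n → pvAGo x idx prev = pvOk (x.drop idx) prev := by
  intro n
  induction n with
  | zero =>
    intro x idx prev h
    have hle : x.length ≤ idx := by omega
    rw [pvAGo, pvOk]
    simp [Nat.not_lt_of_le hle, List.drop_eq_nil_of_le hle]
  | succ n ih =>
    intro x idx prev h
    by_cases hlt : idx < x.length
    · rw [pvAGo, pvOk]
      have hne : (x.drop idx).isEmpty = false := by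
        simp [List.drop_eq_nil_iff]; omega
      simp only [hlt, dif_pos, hne, Bool.false_eq_true, if_false]
      rw [pvAFind_eq_find?]
      simp only [pvWordsA]
      cases hfind : (["aya", "ye", "woo", "ma"] : List String).find?
          (fun w => w != prev && w.toList.isPrefixOf (x.drop idx)) with
      | none => simp
      | some w =>
        dsimp only
        have hm := List.mem_of_find?_eq_some hfind
        have hw : 0 < w.toList.length := by fin_cases hm <;> decide
        rw [List.drop_drop]
        have := ih x (idx + w.toList.length) w (by omega)
        rw [this, Nat.add_comm]
    · have hle : x.length ≤ idx := by omega
      rw [pvAGo, pvOk]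
      simp [Nat.not_lt_of_le hle, List.drop_eq_nil_of_le hle]

theorem foldl_count (f : String → Bool) :
    ∀ (l : List String) (acc : Int),
      l.foldl (fun a x => if f x then a + 1 else a) acc
        = acc + (l.map (fun x => if f x then (1 : Int) else 0)).sum := by
  intro l
  induction l with
  | nil => intro acc; simp
  | cons x xs ih =>
    intro acc
    simp only [List.foldl_cons, List.map_cons, List.sum_cons, ih]
    rcases h : f x <;> simp [h] <;> ring

-- ===== VERDICT (by name: the statement is the Claim_ definition above) =====
theorem solution_spec : Claim_equal_solution := by
  intro babbling _
  unfold Spec_solution solution solution_alt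
  have hfx : ∀ x : String, pvAGo x.toList 0 "" = pvOk x.toList "" := by
    intro x
    have := go_eq_ok x.toList.length x.toList 0 "" (by omega)
    simpa using this
  rw [foldl_count (fun x => pvAGo x.toList 0 "")]
  simp [hfx]
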